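-- pv_equiv track=rewrite | github.com/devinllc/cricketvid | app/services/ball_tracker.py | _contiguous_detection_runs
-- ===== SOURCE A (Python) =====
-- from typing import Any, Dict, List, Optional, Tuple
--
-- def _contiguous_detection_runs(centers: List[Optional[Tuple[int, int]]], min_len: int = 8) -> List[Tuple[int, int]]:
--     """Return [start, end) ranges for contiguous non-empty detections."""
--     runs: List[Tuple[int, int]] = []
--     start: Optional[int] = None
--
--     for idx, center in enumerate(centers):
--         if center is not None and start is None:
--             start = idx
--         elif center is None and start is not None:
--             if idx - start >= min_len:
--                 runs.append((start, idx))
--             start = None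
--
--     if start is not None and len(centers) - start >= min_len:
--         runs.append((start, len(centers)))
--
--     return runs
-- ===== SOURCE B (Python) =====
-- from typing import List, Optional, Tuple
--
-- def _contiguous_detection_runs(centers: List[Optional[Tuple[int, int]]], min_len: int = 8) -> List[Tuple[int, int]]:
--     """Pair run starts with run ends found by comparing each position with its neighbours."""
--     present = [c is not None for c in centers]
--     prev = [False] + present[:-1]
--     nxt = present[1:] + [False]
--     starts = [i for i, (p, q) in enumerate(zip(present, prev)) if p and not q]
--     ends = [i + 1 for i, (p, q) in enumerate(zip(present, nxt)) if p and not q]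
--     return [(s, e) for s, e in zip(starts, ends) if e - s >= min_len]
-- ===== Notes on version B (the rewrite author's own statement) =====
-- stated objective: alternative
-- what changed: Replaces the single-pass start/None state machine (with its separate end-of-list check) by staged boundary detection: build a presence mask, find run starts (present with absent predecessor) and run ends (present with absent successor) by comparing against shifted copies of the mask, zip the two boundary lists into intervals and filter by min_len.
import Mathlib
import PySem

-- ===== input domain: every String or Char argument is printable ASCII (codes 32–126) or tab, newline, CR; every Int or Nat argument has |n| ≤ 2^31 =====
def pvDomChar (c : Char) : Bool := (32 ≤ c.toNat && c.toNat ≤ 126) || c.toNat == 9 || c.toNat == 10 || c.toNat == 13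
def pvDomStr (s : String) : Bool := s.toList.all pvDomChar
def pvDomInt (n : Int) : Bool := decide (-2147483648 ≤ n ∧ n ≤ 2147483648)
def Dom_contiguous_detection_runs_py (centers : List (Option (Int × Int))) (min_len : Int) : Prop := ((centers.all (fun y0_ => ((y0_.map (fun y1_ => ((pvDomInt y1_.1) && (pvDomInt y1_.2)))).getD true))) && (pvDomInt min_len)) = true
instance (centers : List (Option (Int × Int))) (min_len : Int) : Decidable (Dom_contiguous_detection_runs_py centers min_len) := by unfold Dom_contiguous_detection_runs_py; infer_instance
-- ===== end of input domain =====

-- B replaces A's start/None state machine by staged boundary detection: run starts and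
-- run ends found by comparing a presence mask with shifted copies, zipped into intervals
-- and filtered by min_len (objective: alternative algorithm of the same cost).

-- ===== PORT A =====
def contiguous_detection_runs_py (centers : List (Option (Int × Int))) (min_len : Int) : List (Int × Int) :=
  let res := (PySem.List.enumerate centers).foldl
    (fun (st : List (Int × Int) × Option Int) (p : Int × Option (Int × Int)) =>
      match p.2, st.2 with
      | some _, none => (st.1, some p.1)
      | none, some s => (if p.1 - s ≥ min_len then st.1 ++ [(s, p.1)] else st.1, none)
      | _, _ => st) ([], none)
  match res.2 with
  | some s => if (centers.length : Int) - s ≥ min_len then res.1 ++ [(s, (centers.length : Int))] else res.1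
  | none => res.1

-- ===== PORT B =====
-- present[:-1] is List.dropLast, present[1:] is List.tail (exact for every list)
def contiguous_detection_runs_py_alt (centers : List (Option (Int × Int))) (min_len : Int) : List (Int × Int) :=
  let present := centers.map (fun c => c.isSome)
  let prev := false :: present.dropLast
  let nxt := present.tail ++ [false]
  let starts := (PySem.List.enumerate (present.zip prev)).filterMap
    (fun x => if x.2.1 && !x.2.2 then some x.1 else none)
  let ends := (PySem.List.enumerate (present.zip nxt)).filterMap
    (fun x => if x.2.1 && !x.2.2 then some (x.1 + 1) else none)
  (starts.zip ends).filter (fun se => se.2 - se.1 ≥ min_len)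

-- ===== PRECONDITION & SPEC =====
def Spec_contiguous_detection_runs_py (centers : List (Option (Int × Int))) (min_len : Int) (out : List (Int × Int)) : Prop := out = contiguous_detection_runs_py_alt centers min_len
instance (centers : List (Option (Int × Int))) (min_len : Int) (out : List (Int × Int)) : Decidable (Spec_contiguous_detection_runs_py centers min_len out) := by unfold Spec_contiguous_detection_runs_py; infer_instance

-- ===== CLAIM (what is proved, stated in full; the proofs are below) =====
def Claim_equal_contiguous_detection_runs_py : Prop := ∀ (centers : List (Option (Int × Int))) (min_len : Int), Dom_contiguous_detection_runs_py centers min_len → Spec_contiguous_detection_runs_py centers min_len (contiguous_detection_runs_py centers min_len)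

-- ===== LEMMAS AND PROOFS =====

-- A's loop rewritten as a structural recursion emitting the runs from the current state
def cdrA (min_len : Int) (i : Int) (start : Option Int) : List (Option (Int × Int)) → List (Int × Int)
  | [] =>
    match start with
    | some s => if i - s ≥ min_len then [(s, i)] else []
    | none => []
  | x :: t =>
    match x, start with
    | some _, none => cdrA min_len (i + 1) (some i) t
    | none, some s => (if i - s ≥ min_len then [(s, i)] else []) ++ cdrA min_len (i + 1) none t
    | none, none => cdrA min_len (i + 1) none t
    | some _, some s => cdrA min_len (i + 1) (some s) t

theorem cdrA_fold (min_len : Int) : ∀ (xs : List (Option (Int × Int))) (acc : List (Int × Int)) (start : Option Int) (i n : Int), n = i + xs.length →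
    (let r := (PySem.List.enumerate xs i).foldl
      (fun (st : List (Int × Int) × Option Int) (p : Int × Option (Int × Int)) =>
        match p.2, st.2 with
        | some _, none => (st.1, some p.1)
        | none, some s => (if p.1 - s ≥ min_len then st.1 ++ [(s, p.1)] else st.1, none)
        | _, _ => st) (acc, start)
     match r.2 with
     | some s => if n - s ≥ min_len then r.1 ++ [(s, n)] else r.1
     | none => r.1)
    = acc ++ cdrA min_len i start xs := by
  intro xs
  induction xs with
  | nil =>
    intro acc start i n hn
    simp only [List.length_nil, Int.natCast_zero, add_zero] at hn
    subst hn
    cases start with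
    | none => simp [PySem.List.enumerate_nil, cdrA]
    | some s => simp [PySem.List.enumerate_nil, cdrA]; split <;> simp
  | cons x t ih =>
    intro acc start i n hn
    have hn' : n = (i + 1) + (t.length : Int) := by
      simp only [List.length_cons] at hn; push_cast at hn ⊢; omega
    cases x with
    | none =>
      cases start with
      | none =>
        simp only [PySem.List.enumerate_cons, List.foldl_cons]
        simpa [cdrA] using ih acc none (i + 1) n hn'
      | some s =>
        simp only [PySem.List.enumerate_cons, List.foldl_cons]
        have := ih (if i - s ≥ min_len then acc ++ [(s, i)] else acc) none (i + 1) n hn'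
        simp only [cdrA]
        rw [this]
        split <;> simp
    | some c =>
      cases start with
      | none =>
        simp only [PySem.List.enumerate_cons, List.foldl_cons]
        simpa [cdrA] using ih acc (some i) (i + 1) n hn'
      | some s =>
        simp only [PySem.List.enumerate_cons, List.foldl_cons]
        simpa [cdrA] using ih acc (some s) (i + 1) n hn'

-- boundary lists as structural recursions over the presence mask
def startsF (prev : Bool) (i : Int) : List Bool → List Int
  | [] => []
  | p :: t => if p && !prev then i :: startsF p (i + 1) t else startsF p (i + 1) t

def endsF (prev : Bool) (i : Int) : List Bool → List Int
  | [] => if prev then [i] else []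
  | p :: t => if prev && !p then i :: endsF p (i + 1) t else endsF p (i + 1) t

def pairF (min_len : Int) (S E : List Int) : List (Int × Int) :=
  (S.zip E).filter (fun se => se.2 - se.1 ≥ min_len)

-- the port's starts comprehension computes startsF
theorem starts_bridge : ∀ (bs : List Bool) (b : Bool) (i : Int),
    (PySem.List.enumerate (bs.zip (b :: bs.dropLast)) i).filterMap
      (fun x => if x.2.1 && !x.2.2 then some x.1 else none) = startsF b i bs := by
  intro bs
  induction bs with
  | nil => intro b i; simp [startsF]
  | cons p t ih =>
    intro b i
    cases t with
    | nil =>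
      simp [PySem.List.enumerate_cons, PySem.List.enumerate_nil, startsF]
      split <;> simp_all [startsF]
    | cons q t' =>
      have : (p :: q :: t').dropLast = p :: (q :: t').dropLast := by simp
      rw [this]
      conv_lhs => rw [List.zip_cons_cons, PySem.List.enumerate_cons, List.filterMap_cons]
      rw [ih p (i + 1)]
      conv_rhs => rw [startsF]
      cases hc : (p && !b)
      · simp
      · simp

-- the port's ends comprehension computes endsF
theorem ends_bridge_aux : ∀ (t : List Bool) (p : Bool) (i : Int),
    (PySem.List.enumerate ((p :: t).zip (t ++ [false])) i).filterMap
      (fun x => if x.2.1 && !x.2.2 then some (x.1 + 1) else none) = endsF p (i + 1) t := by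
  intro t
  induction t with
  | nil =>
    intro p i
    simp [PySem.List.enumerate_cons, PySem.List.enumerate_nil, endsF]
    split <;> simp_all
  | cons q t' ih =>
    intro p i
    conv_lhs => rw [List.cons_append, List.zip_cons_cons, PySem.List.enumerate_cons,
      List.filterMap_cons]
    rw [ih q (i + 1)]
    conv_rhs => rw [endsF]
    cases hc : (p && !q)
    · simp
    · simp

theorem ends_bridge : ∀ (bs : List Bool) (i : Int),
    (PySem.List.enumerate (bs.zip (bs.tail ++ [false])) i).filterMap
      (fun x => if x.2.1 && !x.2.2 then some (x.1 + 1) else none) = endsF false i bs := by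
  intro bs i
  cases bs with
  | nil => simp [endsF]
  | cons p t =>
    have h1 : (p :: t).tail = t := rfl
    rw [h1, ends_bridge_aux t p i]
    simp [endsF]

-- the state machine computes exactly the filtered zip of the boundary lists
theorem cdrA_pairF (min_len : Int) : ∀ (xs : List (Option (Int × Int))) (i : Int),
    (∀ s, cdrA min_len i (some s) xs
        = pairF min_len (s :: startsF true i (xs.map (fun c => c.isSome))) (endsF true i (xs.map (fun c => c.isSome))))
    ∧ cdrA min_len i none xs
        = pairF min_len (startsF false i (xs.map (fun c => c.isSome))) (endsF false i (xs.map (fun c => c.isSome))) := by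
  intro xs
  induction xs with
  | nil =>
    intro i
    constructor
    · intro s
      simp only [cdrA, List.map_nil, startsF, endsF, pairF]
      split <;> simp_all
    · simp [cdrA, startsF, endsF, pairF]
  | cons x t ih =>
    intro i
    cases x with
    | none =>
      constructor
      · intro s
        simp only [cdrA, List.map_cons, Option.isSome_none, startsF, endsF]
        simp only [Bool.not_false, Bool.and_true, if_true]
        rw [(ih (i + 1)).2]
        simp only [pairF, List.zip_cons_cons, List.filter_cons]
        split <;> simp_all
      · simp only [cdrA, List.map_cons, Option.isSome_none, startsF, endsF]
        simp only [Bool.false_and]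
        exact (ih (i + 1)).2
    | some c =>
      constructor
      · intro s
        simp only [cdrA, List.map_cons, Option.isSome_some, startsF, endsF]
        simp only [Bool.not_true, Bool.and_false]
        exact (ih (i + 1)).1 s
      · simp only [cdrA, List.map_cons, Option.isSome_some, startsF, endsF]
        simp only [Bool.not_false, Bool.and_true, if_true]
        exact (ih (i + 1)).1 i

-- ===== VERDICT (by name: the statement is the Claim_ definition above) =====
theorem contiguous_detection_runs_py_spec : Claim_equal_contiguous_detection_runs_py := by
  intro centers min_len _
  unfold Spec_contiguous_detection_runs_py contiguous_detection_runs_py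
  have hA := cdrA_fold min_len centers [] none 0 centers.length (by simp)
  simp only [List.nil_append] at hA
  rw [hA]
  have h2 : contiguous_detection_runs_py_alt centers min_len
      = pairF min_len (startsF false 0 (centers.map (fun c => c.isSome)))
          (endsF false 0 (centers.map (fun c => c.isSome))) := by
    unfold contiguous_detection_runs_py_alt
    simp only [starts_bridge, ends_bridge, pairF]
  rw [h2]
  exact (cdrA_pairF min_len centers 0).2
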